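-- pv_equiv track=rewrite | github.com/syncerpn/leetcode | 3847_find_the_score_difference_in_a_game.py | scoreDifference
-- ===== SOURCE A (Python) =====
-- from typing import List
--
-- def scoreDifference(nums: List[int]) -> int:
--     p = 0
--     S = [0, 0]
--     for i, a in enumerate(nums):
--         if a % 2:
--             p = 1 - p
--         if i % 6 == 5:
--             p = 1 - p
--         S[p] += a
--     return S[0] - S[1]
-- ===== SOURCE B (Python) =====
-- from typing import List
--
-- def scoreDifference(nums: List[int]) -> int:
--     # Stage 1: prefix counts of odd elements.
--     odd_prefix = []
--     c = 0
--     for a in nums: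
--         c += a % 2
--         odd_prefix.append(c)
--     # Stage 2: sum of the elements landing in bucket 1.  The bucket of the i-th
--     # element is (odd_prefix[i] + (i+1)//6) % 2, because the number of index
--     # toggles (at j%6==5, j<=i) is exactly (i+1)//6.
--     neg = sum(a for (i, a), c in zip(enumerate(nums), odd_prefix)
--               if (c + (i + 1) // 6) % 2 == 1)
--     # Stage 3: S0 - S1 == sum(nums) - 2*S1.
--     return sum(nums) - 2 * neg
-- ===== Notes on version B (the rewrite author's own statement) =====
-- stated objective: alternative
-- what changed: Replaces the single toggling pass over two buckets by three staged passes: a prefix-count of odd elements, a filtered sum of the bucket-1 elements whose bucket is computed in closed form as (odd_prefix[i]+(i+1)//6)%2, and the identity S0-S1 = sum(nums)-2*S1.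
import Mathlib
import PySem

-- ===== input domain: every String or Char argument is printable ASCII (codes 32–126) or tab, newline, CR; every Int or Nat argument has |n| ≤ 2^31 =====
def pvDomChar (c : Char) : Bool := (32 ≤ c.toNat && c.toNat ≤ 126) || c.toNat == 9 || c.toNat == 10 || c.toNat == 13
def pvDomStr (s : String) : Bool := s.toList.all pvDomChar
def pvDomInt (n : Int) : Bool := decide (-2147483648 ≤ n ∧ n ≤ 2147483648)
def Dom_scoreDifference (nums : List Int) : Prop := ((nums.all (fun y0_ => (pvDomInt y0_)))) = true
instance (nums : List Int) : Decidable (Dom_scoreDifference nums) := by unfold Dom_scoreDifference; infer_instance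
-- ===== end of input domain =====

-- B replaces A's single toggling pass over two buckets by three staged passes: a prefix count of
-- odd elements, a filtered sum of the bucket-1 elements (bucket computed in closed form as
-- (odd_prefix[i] + (i+1)//6) % 2), and the identity S0 - S1 = sum(nums) - 2*S1 (objective: alternative).

-- ===== PORT A =====
-- loop body of A: state (p, S0, S1)
def pvStepA (st : Int × Int × Int) (ia : Int × Int) : Int × Int × Int :=
  let p := st.1
  let p := if PySem.Int.mod ia.2 2 ≠ 0 then 1 - p else p
  let p := if PySem.Int.mod ia.1 6 = 5 then 1 - p else p
  if p = 0 then (p, st.2.1 + ia.2, st.2.2) else (p, st.2.1, st.2.2 + ia.2)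

def scoreDifference (nums : List Int) : Int :=
  let r := (PySem.List.enumerate nums 0).foldl pvStepA (0, 0, 0)
  r.2.1 - r.2.2

-- ===== PORT B =====
-- stage-1 loop body of B: state (c, odd_prefix)
def pvPrefStep (st : Int × List Int) (a : Int) : Int × List Int :=
  let c := st.1 + PySem.Int.mod a 2
  (c, st.2 ++ [c])

-- stage-2 generator body of B: add a when the bucket is 1
def pvNegStep (t : Int) (x : (Int × Int) × Int) : Int :=
  if PySem.Int.mod (x.2 + PySem.Int.floordiv (x.1.1 + 1) 6) 2 = 1 then t + x.1.2 else t

def scoreDifference_alt (nums : List Int) : Int :=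
  let oddPrefix := (nums.foldl pvPrefStep (0, [])).2
  let neg := (List.zip (PySem.List.enumerate nums 0) oddPrefix).foldl pvNegStep 0
  nums.sum - 2 * neg

-- ===== PRECONDITION & SPEC =====
def Spec_scoreDifference (nums : List Int) (out : Int) : Prop := out = scoreDifference_alt nums
instance (nums : List Int) (out : Int) : Decidable (Spec_scoreDifference nums out) := by unfold Spec_scoreDifference; infer_instance

-- ===== CLAIM (what is proved, stated in full; the proofs are below) =====
def Claim_equal_scoreDifference : Prop := ∀ (nums : List Int), Dom_scoreDifference nums → Spec_scoreDifference nums (scoreDifference nums)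

-- ===== LEMMAS AND PROOFS =====

-- recursive characterisation of B's odd_prefix list, with running count c
def pvPfx (c : Int) : List Int → List Int
  | [] => []
  | a :: xs => (c + PySem.Int.mod a 2) :: pvPfx (c + PySem.Int.mod a 2) xs

theorem pv_pref_fold : ∀ (xs : List Int) (c : Int) (acc : List Int),
    (List.foldl pvPrefStep (c, acc) xs).2 = acc ++ pvPfx c xs := by
  intro xs
  induction xs with
  | nil => intro c acc; simp [pvPfx]
  | cons a xs ih =>
    intro c acc
    simp only [List.foldl_cons, pvPrefStep, pvPfx]
    rw [ih]
    simp

theorem pv_neg_shift : ∀ (l : List ((Int × Int) × Int)) (t : Int),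
    List.foldl pvNegStep t l = t + List.foldl pvNegStep 0 l := by
  intro l
  induction l with
  | nil => intro t; simp
  | cons x l ih =>
    intro t
    simp only [List.foldl_cons]
    rw [ih (pvNegStep t x), ih (pvNegStep 0 x)]
    simp only [pvNegStep]
    split_ifs <;> ring

-- Main invariant: A's fold from flag p = (c + s/6) % 2 computes S0 - S1 plus the suffix sum
-- minus twice B's bucket-1 sum over the zipped suffix.
theorem pv_main : ∀ (xs : List Int) (s c p S0 S1 : Int), 0 ≤ s → p = (c + s / 6) % 2 →
    ((PySem.List.enumerate xs s).foldl pvStepA (p, S0, S1)).2.1 -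
      ((PySem.List.enumerate xs s).foldl pvStepA (p, S0, S1)).2.2 =
    S0 - S1 + xs.sum -
      2 * ((List.zip (PySem.List.enumerate xs s) (pvPfx c xs)).foldl pvNegStep 0) := by
  intro xs
  induction xs with
  | nil => intro s c p S0 S1 _ _; simp [PySem.List.enumerate_nil, pvPfx]
  | cons a xs ih =>
    intro s c p S0 S1 hs hp
    have hm2 : PySem.Int.mod a 2 = a % 2 := PySem.Int.mod_eq_emod_of_pos (by norm_num)
    have hm6 : PySem.Int.mod s 6 = s % 6 := PySem.Int.mod_eq_emod_of_pos (by norm_num)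
    have hfd : PySem.Int.floordiv (s + 1) 6 = (s + 1) / 6 :=
      PySem.Int.floordiv_eq_ediv_of_pos (by norm_num)
    set c' : Int := c + a % 2 with hc'
    set p' : Int := (c' + (s + 1) / 6) % 2 with hp'
    have hmB : PySem.Int.mod (c' + (s + 1) / 6) 2 = p' :=
      PySem.Int.mod_eq_emod_of_pos (by norm_num)
    simp only [PySem.List.enumerate_cons, pvPfx, hm2, ← hc', List.zip_cons_cons,
      List.foldl_cons, List.sum_cons]
    have hpA : pvStepA (p, S0, S1) (s, a) =
        (p', if p' = 0 then S0 + a else S0, if p' = 0 then S1 else S1 + a) := by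
      simp only [pvStepA, hm2, hm6]
      have hthis : (if s % 6 = 5 then (1 - if a % 2 ≠ 0 then 1 - p else p)
          else (if a % 2 ≠ 0 then 1 - p else p)) = p' := by
        rw [hp, hp', hc']; split_ifs <;> omega
      rw [hthis]
      split_ifs <;> rfl
    rw [hpA, pv_neg_shift _ (pvNegStep 0 ((s, a), c'))]
    have hN : pvNegStep 0 ((s, a), c') = (if p' = 1 then a else 0) := by
      simp only [pvNegStep, hfd, hmB]
      split_ifs <;> simp
    have hIH := ih (s + 1) c' p' (if p' = 0 then S0 + a else S0)
      (if p' = 0 then S1 else S1 + a) (by omega) hp'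
    have hp01 : p' = 0 ∨ p' = 1 := by rw [hp']; omega
    rcases hp01 with h | h <;> simp only [h] at hIH hN ⊢ <;>
      norm_num at hIH hN ⊢ <;> omega

-- ===== VERDICT (by name: the statement is the Claim_ definition above) =====
theorem scoreDifference_spec : Claim_equal_scoreDifference := by
  intro nums _
  unfold Spec_scoreDifference scoreDifference scoreDifference_alt
  rw [pv_pref_fold nums 0 []]
  simp only [List.nil_append]
  have := pv_main nums 0 0 0 0 0 le_rfl (by norm_num)
  omega
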